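-- pv_equiv track=rewrite | github.com/TheGovindRachapudi/MIDIGPT | backend/midi_engine/theory.py | build_chord
-- ===== SOURCE A (Python) =====
-- from typing import List, Dict, Tuple
--
-- NOTE_TO_MIDI = {
--     'C': 0, 'C#': 1, 'Db': 1, 'D': 2, 'D#': 3, 'Eb': 3, 'E': 4, 'F': 5,
--     'F#': 6, 'Gb': 6, 'G': 7, 'G#': 8, 'Ab': 8, 'A': 9, 'A#': 10, 'Bb': 10, 'B': 11
-- }
--
-- CHORD_INTERVALS = {
--     'minor': [0, 3, 7],
--     'major': [0, 4, 7],
--     'add9': [0, 2, 3, 7],  # minor add9: root, 9th, minor 3rd, 5th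
--     'maj7': [0, 4, 7, 11],  # major 7th
--     'sus2': [0, 2, 7],      # suspended 2nd
--     'sus4': [0, 5, 7],      # suspended 4th
-- }
--
-- def build_chord(root: str, chord_type: str, octave: int = 4, inversion: int = 0) -> List[int]:
--     """
--     Build a chord from root note.
--
--     Args:
--         root: Root note name (e.g., 'C', 'F#')
--         chord_type: Type of chord ('minor', 'major', 'add9', 'maj7', 'sus2', 'sus4')
--         octave: Base octave for the chord
--         inversion: Chord inversion (0=root position, 1=first inversion, etc.)
--     """
--     root_midi = NOTE_TO_MIDI[root] + (octave * 12)
--     intervals = CHORD_INTERVALS.get(chord_type, CHORD_INTERVALS['minor'])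
--
--     notes = [root_midi + interval for interval in intervals]
--
--     # Apply inversion
--     if inversion > 0:
--         for _ in range(inversion % len(notes)):
--             notes[0] += 12
--             notes = notes[1:] + [notes[0]]
--
--     return sorted(notes)
-- ===== SOURCE B (Python) =====
-- NOTE_TO_MIDI = {
--     'C': 0, 'C#': 1, 'Db': 1, 'D': 2, 'D#': 3, 'Eb': 3, 'E': 4, 'F': 5,
--     'F#': 6, 'Gb': 6, 'G': 7, 'G#': 8, 'Ab': 8, 'A': 9, 'A#': 10, 'Bb': 10, 'B': 11
-- }
--
-- CHORD_INTERVALS = {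
--     'minor': [0, 3, 7],
--     'major': [0, 4, 7],
--     'add9': [0, 2, 3, 7],
--     'maj7': [0, 4, 7, 11],
--     'sus2': [0, 2, 7],
--     'sus4': [0, 5, 7],
-- }
--
-- def build_chord(root: str, chord_type: str, octave: int = 4, inversion: int = 0):
--     root_midi = NOTE_TO_MIDI[root] + octave * 12
--     intervals = CHORD_INTERVALS.get(chord_type, CHORD_INTERVALS['minor'])
--     k = inversion % len(intervals) if inversion > 0 else 0
--     return sorted(root_midi + iv + (12 if i < k else 0)
--                   for i, iv in enumerate(intervals))
-- ===== Notes on version B (the rewrite author's own statement) =====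
-- stated objective: simpler
-- what changed: The destructive rotation loop (increment head, rotate, repeat inversion%len times) is replaced by a single comprehension that adds 12 to the lowest k=inversion%len notes directly and sorts once, since the final sort makes the rotation itself irrelevant.
import Mathlib
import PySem

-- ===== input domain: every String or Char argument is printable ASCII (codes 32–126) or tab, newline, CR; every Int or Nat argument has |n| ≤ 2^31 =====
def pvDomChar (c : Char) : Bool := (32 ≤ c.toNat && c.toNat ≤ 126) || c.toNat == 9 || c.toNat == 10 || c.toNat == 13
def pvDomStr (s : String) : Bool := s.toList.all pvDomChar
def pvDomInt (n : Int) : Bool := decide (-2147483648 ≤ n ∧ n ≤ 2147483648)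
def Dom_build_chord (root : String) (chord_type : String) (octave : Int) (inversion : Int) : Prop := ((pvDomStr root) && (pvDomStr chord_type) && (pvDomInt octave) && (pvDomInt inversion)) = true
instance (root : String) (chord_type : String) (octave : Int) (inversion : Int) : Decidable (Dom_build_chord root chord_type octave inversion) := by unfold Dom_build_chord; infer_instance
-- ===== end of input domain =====

-- B replaces A's rotate-and-bump inversion loop by directly adding 12 to the first
-- inversion%len notes and sorting once (simpler; the sort discards the rotation anyway).


-- ===== PORT A =====
-- module constants shared by both Python files
def noteToMidi : PySem.Dict String Int := PySem.Dict.ofList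
  [("C", 0), ("C#", 1), ("Db", 1), ("D", 2), ("D#", 3), ("Eb", 3), ("E", 4), ("F", 5),
   ("F#", 6), ("Gb", 6), ("G", 7), ("G#", 8), ("Ab", 8), ("A", 9), ("A#", 10), ("Bb", 10), ("B", 11)]

def chordIntervals : PySem.Dict String (List Int) := PySem.Dict.ofList
  [("minor", [0, 3, 7]), ("major", [0, 4, 7]), ("add9", [0, 2, 3, 7]),
   ("maj7", [0, 4, 7, 11]), ("sus2", [0, 2, 7]), ("sus4", [0, 5, 7])]

-- one iteration of A's loop body: notes[0] += 12; notes = notes[1:] + [notes[0]]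
-- (pyGetD/pySetD total forms: the list is never empty when the loop runs, so the defaults are never used)
def chordStep (notes : List Int) : List Int :=
  let notes1 := PySem.List.pySetD notes 0 (PySem.List.pyGetD notes 0 0 + 12)
  PySem.List.slice notes1 (some 1) none ++ [PySem.List.pyGetD notes1 0 0]

def build_chord (root : String) (chord_type : String) (octave : Int) (inversion : Int) : List Int :=
  let root_midi := noteToMidi.getD root 0 + octave * 12   -- KeyError on missing root excluded by Pre_
  let intervals := chordIntervals.getD chord_type (chordIntervals.getD "minor" [])
  let notes := intervals.map (fun interval => root_midi + interval)
  let notes :=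
    if inversion > 0 then
      (PySem.List.pyRange 0 (PySem.Int.mod inversion (PySem.List.len notes)) 1).foldl
        (fun acc _ => chordStep acc) notes
    else notes
  PySem.List.sorted notes (fun x => x) false

-- ===== PORT B =====
def build_chord_alt (root : String) (chord_type : String) (octave : Int) (inversion : Int) : List Int :=
  let root_midi := noteToMidi.getD root 0 + octave * 12
  let intervals := chordIntervals.getD chord_type (chordIntervals.getD "minor" [])
  let k := if inversion > 0 then PySem.Int.mod inversion (PySem.List.len intervals) else 0
  PySem.List.sorted
    ((PySem.List.enumerate intervals 0).map
      (fun p => root_midi + p.2 + (if p.1 < k then (12 : Int) else 0)))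
    (fun x => x) false

-- ===== PRECONDITION & SPEC =====
-- Pre_ excludes exactly the roots not in NOTE_TO_MIDI, on which Python A raises KeyError.
def Pre_build_chord (root : String) (chord_type : String) (octave : Int) (inversion : Int) : Prop :=
  root ∈ ["C", "C#", "Db", "D", "D#", "Eb", "E", "F", "F#", "Gb", "G", "G#", "Ab", "A", "A#", "Bb", "B"]
instance (root : String) (chord_type : String) (octave : Int) (inversion : Int) : Decidable (Pre_build_chord root chord_type octave inversion) := by unfold Pre_build_chord; infer_instance

def pvWitness_build_chord : String × String × Int × Int := ("C", "minor", 4, 1)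

def Spec_build_chord (root : String) (chord_type : String) (octave : Int) (inversion : Int) (out : List Int) : Prop := out = build_chord_alt root chord_type octave inversion
instance (root : String) (chord_type : String) (octave : Int) (inversion : Int) (out : List Int) : Decidable (Spec_build_chord root chord_type octave inversion out) := by unfold Spec_build_chord; infer_instance

-- ===== CLAIM (what is proved, stated in full; the proofs are below) =====
def Claim_equal_build_chord : Prop := ∀ (root : String) (chord_type : String) (octave : Int) (inversion : Int), Dom_build_chord root chord_type octave inversion → Pre_build_chord root chord_type octave inversion → Spec_build_chord root chord_type octave inversion (build_chord root chord_type octave inversion)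

-- ===== LEMMAS AND PROOFS =====

-- the interval list A and B fetch is never empty (every CHORD_INTERVALS value is nonempty)
lemma chordIntervals_getD_ne_nil (ct : String) :
    chordIntervals.getD ct (chordIntervals.getD "minor" []) ≠ [] := by
  rw [PySem.Dict.getD_eq_get?_getD]
  rcases h : PySem.Dict.get? chordIntervals ct with _ | v
  · simp; decide
  · have hm := PySem.Dict.mem_items_of_get?_eq_some _ h
    have hit : chordIntervals.items = [("minor", [0, 3, 7]), ("major", [0, 4, 7]), ("add9", [0, 2, 3, 7]), ("maj7", [0, 4, 7, 11]), ("sus2", [0, 2, 7]), ("sus4", [0, 5, 7])] := by decide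
    rw [hit] at hm
    simp only [List.mem_cons, List.not_mem_nil, or_false, Prod.mk.injEq] at hm
    rcases hm with h1 | h1 | h1 | h1 | h1 | h1 <;> simp [h1.2]

-- folding a constant-step function is function iteration
lemma foldl_const_iterate {α β : Type} (g : α → α) (xs : List β) (init : α) :
    xs.foldl (fun a _ => g a) init = g^[xs.length] init := by
  induction xs generalizing init with
  | nil => rfl
  | cons x xs ih => simp [List.foldl_cons, ih, Function.iterate_succ_apply]

-- one loop step on a nonempty list: move head + 12 to the back
lemma chordStep_cons (x : Int) (rest : List Int) :
    chordStep (x :: rest) = rest ++ [x + 12] := by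
  simp [chordStep, PySem.List.pyGetD_zero_cons, PySem.List.pySetD_of_nonneg,
        PySem.List.slice_from_one]

-- m loop steps: the first m notes get +12 and move to the back
lemma chordStep_iterate (m : Nat) (l : List Int) (h : m ≤ l.length) :
    chordStep^[m] l = l.drop m ++ (l.take m).map (· + 12) := by
  induction m with
  | zero => simp
  | succ m ih =>
    have hm : m < l.length := by omega
    rw [Function.iterate_succ_apply', ih (by omega)]
    rw [List.drop_eq_getElem_cons hm]
    rw [show (l[m] :: l.drop (m + 1)) ++ (l.take m).map (· + 12)
          = l[m] :: (l.drop (m + 1) ++ (l.take m).map (· + 12)) from rfl]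
    rw [chordStep_cons]
    simp only [List.map_append, List.take_add_one, List.getElem?_eq_getElem hm,
      Option.toList_some, List.map_cons, List.map_nil, List.append_assoc]

-- B's comprehension splits as: +12 on the first (k-s) positions, +0 on the rest
lemma enum_split (f : Int → Int) (xs : List Int) : ∀ (s k : Int),
    (PySem.List.enumerate xs s).map (fun p => f p.2 + (if p.1 < k then (12 : Int) else 0))
      = ((xs.take (k - s).toNat).map (fun x => f x + 12))
        ++ ((xs.drop (k - s).toNat).map (fun x => f x + 0)) := by
  induction xs with
  | nil => simp [PySem.List.enumerate_nil]
  | cons x xs ih =>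
    intro s k
    rw [PySem.List.enumerate_cons, List.map_cons, ih (s + 1) k]
    by_cases h : s < k
    · have ht : (k - s).toNat = (k - (s + 1)).toNat + 1 := by omega
      rw [ht]
      simp [h]
    · have ht : (k - s).toNat = 0 := by omega
      have ht' : (k - (s + 1)).toNat = 0 := by omega
      rw [ht, ht']
      simp [h]

-- ===== VERDICT (by name: the statement is the Claim_ definition above) =====
theorem build_chord_spec : Claim_equal_build_chord := by
  intro root chord_type octave inversion _ _
  unfold Spec_build_chord build_chord build_chord_alt
  set rm := noteToMidi.getD root 0 + octave * 12 with hrm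
  set intervals := chordIntervals.getD chord_type (chordIntervals.getD "minor" []) with hiv
  have hne : intervals ≠ [] := chordIntervals_getD_ne_nil chord_type
  have hlen : 0 < intervals.length := List.length_pos_iff.mpr hne
  simp only []
  by_cases hpos : inversion > 0
  · simp only [if_pos hpos]
    rw [foldl_const_iterate, PySem.List.length_pyRange_one]
    have hlenN : PySem.List.len (intervals.map (fun interval => rm + interval)) = (intervals.length : Int) := by
      simp [PySem.List.len_eq]
    set kI := PySem.Int.mod inversion (PySem.List.len (intervals.map (fun interval => rm + interval))) with hk
    have hL : (0 : Int) < PySem.List.len (intervals.map (fun interval => rm + interval)) := by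
      rw [hlenN]; exact_mod_cast hlen
    have hk0 : 0 ≤ kI := PySem.Int.mod_nonneg _ hL
    have hklt : kI < (intervals.length : Int) := by rw [← hlenN]; exact PySem.Int.mod_lt _ hL
    have hmle : kI.toNat ≤ (intervals.map (fun interval => rm + interval)).length := by
      simp only [List.length_map]; omega
    rw [chordStep_iterate _ _ (by simpa using hmle)]
    rw [enum_split (fun x => rm + x) intervals 0 (PySem.Int.mod inversion (PySem.List.len intervals))]
    have hkk : PySem.Int.mod inversion (PySem.List.len intervals) = kI := by
      rw [hk, hlenN]; simp [PySem.List.len_eq]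
    rw [hkk]
    apply PySem.List.sorted_eq_sorted_of_perm _ _ _ (fun a b hab => hab)
    simp only [Int.sub_zero, List.map_map, ← List.map_take, ← List.map_drop, add_zero]
    exact List.perm_append_comm
  · simp only [if_neg hpos]
    rw [enum_split (fun x => rm + x) intervals 0 0]
    simp
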